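-- pv_equiv track=rewrite | github.com/stanfordnlp/dspy | dspy/teleprompt/dlcot_optimizer.py | _split_into_verification_blocks
-- ===== SOURCE A (Python) =====
-- from typing import Any, Callable, Dict, List, Optional, Tuple
--
-- def _split_into_verification_blocks(verification_content: str) -> List[str]:
--     """Split verification content into distinct verification blocks.
--
--     Verification blocks represent different validation or checking steps.
--
--     Args:
--         verification_content: Raw verification content as a string
--
--     Returns:
--         List of verification blocks, each as a string
--     """
--     # Similar to approach blocks, but with verification-specific markers
--     markers = ["verify", "check", "to confirm", "double-check", "validation"]
--     blocks = []
--     current_block = []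
--
--     for line in verification_content.split("\n"):
--         line_lower = line.lower()
--
--         if any(marker in line_lower for marker in markers) and current_block:
--             blocks.append("\n".join(current_block))
--             current_block = []
--
--         current_block.append(line)
--
--     if current_block:
--         blocks.append("\n".join(current_block))
--
--     # If no blocks were found, treat the entire content as one block
--     if not blocks and verification_content.strip():
--         blocks = [verification_content]
--
--     return blocks
-- ===== SOURCE B (Python) =====
-- def _split_into_verification_blocks(verification_content: str):
--     """Cut the content at marker lines: find each next boundary index and slice,
--     instead of accumulating lines and flushing."""
--     markers = ["verify", "check", "to confirm", "double-check", "validation"]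
--
--     def is_marker(line):
--         low = line.lower()
--         return any(m in low for m in markers)
--
--     lines = verification_content.split("\n")
--     blocks = []
--     start = 0
--     while True:
--         cut = next((i for i in range(start + 1, len(lines)) if is_marker(lines[i])), None)
--         if cut is None:
--             blocks.append("\n".join(lines[start:]))
--             return blocks
--         blocks.append("\n".join(lines[start:cut]))
--         start = cut
-- ===== Notes on version B (the rewrite author's own statement) =====
-- stated objective: alternative
-- what changed: Replaces A's accumulate-and-flush loop (per-line current_block buffer plus two post-loop fixups) with a boundary-driven scan: repeatedly find the next marker line index after the current block start and slice-join lines[start:cut], making the dead 'no blocks' fallback disappear.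
import Mathlib
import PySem

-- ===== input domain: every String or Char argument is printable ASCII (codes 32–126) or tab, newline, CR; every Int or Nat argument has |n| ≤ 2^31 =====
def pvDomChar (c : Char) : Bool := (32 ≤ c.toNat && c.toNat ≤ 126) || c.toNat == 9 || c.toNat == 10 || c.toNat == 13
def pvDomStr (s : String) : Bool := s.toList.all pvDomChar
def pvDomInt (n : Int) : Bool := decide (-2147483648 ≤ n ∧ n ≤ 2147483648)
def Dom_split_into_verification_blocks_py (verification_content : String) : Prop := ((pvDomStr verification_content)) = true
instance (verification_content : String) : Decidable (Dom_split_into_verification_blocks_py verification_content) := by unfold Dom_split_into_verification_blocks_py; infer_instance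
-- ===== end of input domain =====

-- B replaces A's accumulate-and-flush loop by a find-next-boundary-and-slice scan (alternative decomposition, same cost).

-- ===== PORT A =====
def pvMarkersA : List (List Char) :=
  ["verify".toList, "check".toList, "to confirm".toList, "double-check".toList, "validation".toList]

def pvStepA (st : List (List Char) × List (List Char)) (line : List Char) :
    List (List Char) × List (List Char) :=
  let line_lower := PySem.Chars.lower line
  if (pvMarkersA.any fun m => PySem.Chars.isIn m line_lower) && !st.2.isEmpty then
    (st.1 ++ [PySem.Chars.join ['\n'] st.2], [line])
  else
    (st.1, st.2 ++ [line])

def split_into_verification_blocks_py (verification_content : String) : List String :=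
  let st := (PySem.Chars.splitOn verification_content.toList ['\n']).foldl pvStepA ([], [])
  let blocks := if !st.2.isEmpty then st.1 ++ [PySem.Chars.join ['\n'] st.2] else st.1
  let blocks' :=
    if blocks.isEmpty && !(PySem.Chars.strip verification_content.toList).isEmpty then
      [verification_content.toList]
    else blocks
  blocks'.map String.ofList

-- ===== PORT B =====
def pvIsMarker (line : List Char) : Bool :=
  let low := PySem.Chars.lower line
  (["verify".toList, "check".toList, "to confirm".toList, "double-check".toList,
    "validation".toList] : List (List Char)).any fun m => PySem.Chars.isIn m low

-- hand port (exact) of next((i for i in range(start+1, len(lines)) if is_marker(lines[i])), None)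
def pvFindCut (lines : List (List Char)) (i : Nat) : Option Nat :=
  if h : i < lines.length then
    if pvIsMarker lines[i] then some i else pvFindCut lines (i + 1)
  else none
termination_by lines.length - i

-- bounds of the found cut; the port's own recursion (pvBRec) cites it to terminate
theorem pvFindCut_bounds (lines : List (List Char)) (i : Nat) (c : Nat) :
    pvFindCut lines i = some c → i ≤ c ∧ c < lines.length := by
  fun_induction pvFindCut lines i with
  | case1 i hi hm => intro h; simp only [Option.some.injEq] at h; omega
  | case2 i hi hm ih => intro h; have := ih h; omega
  | case3 i hi => intro h; simp_all

def pvBRec (lines : List (List Char)) (start : Nat) : List (List Char) :=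
  match h : pvFindCut lines (start + 1) with
  | none => [PySem.Chars.join ['\n'] (PySem.List.slice lines (some (start : Int)) none)]
  | some cut =>
      PySem.Chars.join ['\n'] (PySem.List.slice lines (some (start : Int)) (some (cut : Int))) ::
        pvBRec lines cut
termination_by lines.length - start
decreasing_by
  have := pvFindCut_bounds lines (start + 1) cut h
  omega

def split_into_verification_blocks_py_alt (verification_content : String) : List String :=
  (pvBRec (PySem.Chars.splitOn verification_content.toList ['\n']) 0).map String.ofList

-- ===== PRECONDITION & SPEC =====
def Spec_split_into_verification_blocks_py (verification_content : String) (out : List String) : Prop := out = split_into_verification_blocks_py_alt verification_content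
instance (verification_content : String) (out : List String) : Decidable (Spec_split_into_verification_blocks_py verification_content out) := by unfold Spec_split_into_verification_blocks_py; infer_instance

-- ===== CLAIM (what is proved, stated in full; the proofs are below) =====
def Claim_equal_split_into_verification_blocks_py : Prop := ∀ (verification_content : String), Dom_split_into_verification_blocks_py verification_content → Spec_split_into_verification_blocks_py verification_content (split_into_verification_blocks_py verification_content)

-- ===== LEMMAS AND PROOFS =====

-- common intermediate: group the lines, a new group opening at each marker line
def pvGroups (cur : List (List Char)) : List (List Char) → List (List Char)
  | [] => [PySem.Chars.join ['\n'] cur]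
  | y :: ys =>
      if pvIsMarker y then PySem.Chars.join ['\n'] cur :: pvGroups [y] ys
      else pvGroups (cur ++ [y]) ys

theorem pvGroups_ne_nil (cur ls : List (List Char)) : pvGroups cur ls ≠ [] := by
  cases ls with
  | nil => simp [pvGroups]
  | cons y ys => simp only [pvGroups]; split <;> simp [pvGroups_ne_nil]

theorem pvCondA_eq (line : List Char) :
    (pvMarkersA.any fun m => PySem.Chars.isIn m (PySem.Chars.lower line)) = pvIsMarker line := rfl

-- A's fold, once current_block is nonempty, produces exactly the groups
theorem pvFoldA (ls : List (List Char)) (blocks cur : List (List Char)) (h : cur ≠ []) :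
    (ls.foldl pvStepA (blocks, cur)).1 ++
        [PySem.Chars.join ['\n'] (ls.foldl pvStepA (blocks, cur)).2] =
      blocks ++ pvGroups cur ls := by
  induction ls generalizing blocks cur with
  | nil => simp [pvGroups]
  | cons y ys ih =>
    have hcur : cur.isEmpty = false := by simpa using h
    cases hP : pvIsMarker y with
    | true =>
      have hstep : pvStepA (blocks, cur) y =
          (blocks ++ [PySem.Chars.join ['\n'] cur], [y]) := by
        simp [pvStepA, pvCondA_eq, hP, hcur]
      rw [List.foldl_cons, hstep, ih _ _ (by simp)]
      simp [pvGroups, hP]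
    | false =>
      have hstep : pvStepA (blocks, cur) y = (blocks, cur ++ [y]) := by
        simp [pvStepA, pvCondA_eq, hP]
      rw [List.foldl_cons, hstep, ih _ _ (by simp)]
      simp [pvGroups, hP]

theorem pvFoldA_cur_ne_nil (ls : List (List Char)) (blocks cur : List (List Char))
    (h : cur ≠ []) : (ls.foldl pvStepA (blocks, cur)).2 ≠ [] := by
  induction ls generalizing blocks cur with
  | nil => exact h
  | cons y ys ih =>
    rw [List.foldl_cons, pvStepA]
    split
    · exact ih _ _ (by simp)
    · exact ih _ _ (by simp)

theorem pvFindCut_none (lines : List (List Char)) (i : Nat) :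
    pvFindCut lines i = none → ∀ j (hj : j < lines.length), i ≤ j → pvIsMarker lines[j] = false := by
  fun_induction pvFindCut lines i with
  | case1 i hi hm => intro h; simp at h
  | case2 i hi hm ih =>
    intro h j hj hij
    by_cases hji : j = i
    · subst hji; simpa using hm
    · exact ih h j hj (by omega)
  | case3 i hi =>
    intro h j hj hij
    exact absurd hj (by omega)

theorem pvFindCut_some (lines : List (List Char)) (i c : Nat) :
    pvFindCut lines i = some c →
    ((∀ j (hj : j < lines.length), i ≤ j → j < c → pvIsMarker lines[j] = false) ∧
      ∃ hc : c < lines.length, pvIsMarker lines[c] = true) := by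
  fun_induction pvFindCut lines i with
  | case1 i hi hm =>
    intro h
    simp only [Option.some.injEq] at h
    subst h
    exact ⟨fun j hj h1 h2 => by omega, hi, hm⟩
  | case2 i hi hm ih =>
    intro h
    obtain ⟨h1, h2⟩ := ih h
    refine ⟨fun j hj hij hjc => ?_, h2⟩
    by_cases hji : j = i
    · subst hji; simpa using hm
    · exact h1 j hj (by omega) hjc
  | case3 i hi => intro h; simp at h

theorem pvGroups_no_marker (rest : List (List Char)) (cur : List (List Char))
    (h : ∀ y ∈ rest, pvIsMarker y = false) :
    pvGroups cur rest = [PySem.Chars.join ['\n'] (cur ++ rest)] := by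
  induction rest generalizing cur with
  | nil => simp [pvGroups]
  | cons y ys ih =>
    have hy : pvIsMarker y = false := h y (by simp)
    rw [pvGroups, if_neg (by simp [hy]), ih _ (fun z hz => h z (by simp [hz]))]
    simp

theorem pvGroups_split (ws : List (List Char)) (z : List Char) (zs : List (List Char))
    (cur : List (List Char))
    (hw : ∀ y ∈ ws, pvIsMarker y = false) (hz : pvIsMarker z = true) :
    pvGroups cur (ws ++ z :: zs) =
      PySem.Chars.join ['\n'] (cur ++ ws) :: pvGroups [z] zs := by
  induction ws generalizing cur with
  | nil => simp [pvGroups, hz]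
  | cons w ws ih =>
    have hw0 : pvIsMarker w = false := hw w (by simp)
    rw [List.cons_append, pvGroups, if_neg (by simp [hw0]),
      ih _ (fun y hy => hw y (by simp [hy]))]
    simp

theorem pvBRec_eq (lines : List (List Char)) (start : Nat) (h : start < lines.length) :
    pvBRec lines start = pvGroups [lines[start]] (lines.drop (start + 1)) := by
  fun_induction pvBRec lines start with
  | case1 start hnone =>
    rw [PySem.List.slice_from_natCast, List.drop_eq_getElem_cons h,
      pvGroups_no_marker _ _ ?_]
    · simp
    · intro y hy
      obtain ⟨jj, hjj, rfl⟩ := List.mem_iff_getElem.mp hy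
      rw [List.getElem_drop]
      exact pvFindCut_none lines (start + 1) hnone _ (by simp at hjj; omega) (by omega)
  | case2 start cut hsome ih =>
    obtain ⟨hlo, hhi⟩ := pvFindCut_bounds lines (start + 1) cut hsome
    obtain ⟨hno, hcl, hcm⟩ := pvFindCut_some lines (start + 1) cut hsome
    have hsplit : lines.drop (start + 1) =
        (lines.drop (start + 1)).take (cut - (start + 1)) ++
          lines[cut] :: lines.drop (cut + 1) := by
      conv_lhs => rw [← List.take_append_drop (cut - (start + 1)) (lines.drop (start + 1))]
      rw [List.drop_drop]
      congr 1
      have : start + 1 + (cut - (start + 1)) = cut := by omega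
      rw [this, List.drop_eq_getElem_cons hhi]
    rw [hsplit, pvGroups_split _ _ _ _ ?_ hcm, ih hhi]
    · congr 2
      rw [PySem.List.slice_natCast, List.drop_eq_getElem_cons h]
      have : cut - start = (cut - (start + 1)) + 1 := by omega
      rw [this, List.take_succ_cons]
      simp
    · intro y hy
      obtain ⟨jj, hjj, rfl⟩ := List.mem_iff_getElem.mp hy
      rw [List.getElem_take, List.getElem_drop]
      have hjj' : jj < cut - (start + 1) := by
        simp at hjj; omega
      exact hno _ (by omega) (by omega) (by omega)

theorem pvSplitOn_go_ne_nil (sep : List Char) (fuel : Nat) (l cur : List Char)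
    (acc : List (List Char)) : PySem.Chars.splitOn.go sep fuel l cur acc ≠ [] := by
  induction fuel generalizing l cur acc with
  | zero => rw [PySem.Chars.splitOn.go]; simp
  | succ fuel ih =>
    cases l with
    | nil => rw [PySem.Chars.splitOn.go]; simp; omega
    | cons c rest =>
      rw [PySem.Chars.splitOn.go]
      split
      · exact ih _ _ _
      · exact ih _ _ _

theorem pvSplitOn_ne_nil (s sep : List Char) : PySem.Chars.splitOn s sep ≠ [] := by
  rw [PySem.Chars.splitOn]
  exact pvSplitOn_go_ne_nil _ _ _ _ _

-- ===== VERDICT (by name: the statement is the Claim_ definition above) =====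
theorem split_into_verification_blocks_py_spec : Claim_equal_split_into_verification_blocks_py := by
  intro vc _
  unfold Spec_split_into_verification_blocks_py
  unfold split_into_verification_blocks_py split_into_verification_blocks_py_alt
  obtain ⟨x, xs, hx⟩ := List.exists_cons_of_ne_nil (pvSplitOn_ne_nil vc.toList ['\n'])
  rw [hx]
  have h1 : pvStepA ([], []) x = ([], [x]) := by simp [pvStepA]
  have h2 := pvFoldA xs [] [x] (by simp)
  have h3 := pvFoldA_cur_ne_nil xs [] [x] (by simp)
  have h4 := pvGroups_ne_nil [x] xs
  have h5 : pvBRec (x :: xs) 0 = pvGroups [x] xs := by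
    rw [pvBRec_eq (x :: xs) 0 (by simp)]
    simp
  simp only [List.foldl_cons, h1, h5]
  have hb : (!(List.foldl pvStepA ([], [x]) xs).2.isEmpty) = true := by
    simpa [List.isEmpty_iff] using h3
  rw [if_pos hb, h2]
  simp [List.isEmpty_iff, h4]
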